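-- pv_equiv track=rewrite | github.com/ACFHarbinger/WSmartPlus-Route | logic/src/policies/cluster_first_route_second/tsp_metaheuristics.py | _get_swap_sequence
-- ===== SOURCE A (Python) =====
-- from typing import Dict, List, Optional, Set, Tuple
--
-- def _get_swap_sequence(source: List[int], target: List[int]) -> List[Tuple[int, int]]:
--     """
--     Compute sequence of swap operations to transform source tour into target tour.
--
--     This is used to compute the "velocity" in discrete PSO by finding
--     the swaps needed to move from current position to pbest/gbest.
--
--     Args:
--         source: Current tour
--         target: Target tour
--
--     Returns:
--         List of (i, j) index pairs to swap
--     """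
--     swaps = []
--     temp = source.copy()
--
--     for i in range(1, len(temp) - 1):  # Exclude depot at start and end
--         if temp[i] != target[i]:
--             # Find where target[i] is in temp
--             for j in range(i + 1, len(temp) - 1):
--                 if temp[j] == target[i]:
--                     swaps.append((i, j))
--                     temp[i], temp[j] = temp[j], temp[i]
--                     break
--
--     return swaps
-- ===== SOURCE B (Python) =====
-- from typing import List, Tuple
--
-- def _get_swap_sequence(source: List[int], target: List[int]) -> List[Tuple[int, int]]:
--     """Compute swap sequence via a value -> sorted-positions index (no inner scan)."""
--     n = len(source)
--     temp = list(source)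
--     pos = {}  # value -> ascending list of its positions in the window [i, n-2]
--     for k in range(1, n - 1):
--         pos.setdefault(temp[k], []).append(k)
--     swaps = []
--     for i in range(1, n - 1):
--         v = temp[i]
--         pos[v].pop(0)  # drop position i: the window shrinks to [i+1, n-2]
--         t = target[i]
--         if v != t:
--             lst = pos.get(t)
--             if lst:
--                 j = lst.pop(0)  # first position of t after i
--                 swaps.append((i, j))
--                 temp[i], temp[j] = t, v
--                 # index j now holds v: insert it into pos[v] keeping order
--                 lv = pos[v]
--                 k2 = 0
--                 while k2 < len(lv) and lv[k2] < j:
--                     k2 += 1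
--                 lv.insert(k2, j)
--     return swaps
-- ===== Notes on version B (the rewrite author's own statement) =====
-- stated objective: faster
-- what changed: B builds a value -> sorted-positions dictionary over the tour window once and pops/reinserts positions across swaps, so A's inner linear scan for target[i] disappears (O(1) expected lookup per step instead of O(n)).
import Mathlib
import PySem

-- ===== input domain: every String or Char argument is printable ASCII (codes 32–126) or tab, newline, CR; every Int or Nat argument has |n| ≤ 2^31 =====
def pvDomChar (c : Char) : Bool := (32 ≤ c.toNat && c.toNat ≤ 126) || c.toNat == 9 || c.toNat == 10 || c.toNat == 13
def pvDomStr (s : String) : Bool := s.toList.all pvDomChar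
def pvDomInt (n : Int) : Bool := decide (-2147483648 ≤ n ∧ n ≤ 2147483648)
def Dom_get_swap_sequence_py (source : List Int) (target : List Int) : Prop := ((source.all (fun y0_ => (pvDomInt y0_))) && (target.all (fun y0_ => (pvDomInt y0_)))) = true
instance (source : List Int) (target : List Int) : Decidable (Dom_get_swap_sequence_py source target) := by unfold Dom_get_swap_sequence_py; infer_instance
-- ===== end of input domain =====

-- B replaces A's inner linear scan by a value → sorted-positions dictionary, updated across swaps
-- (measurably faster on tours with distinct stops); equivalence of return values is proved below.

-- ===== PORT A =====
-- inner 'for j in range(i+1, len(temp)-1): if temp[j] == target[i]: … break' — first matching j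
def pvFindJ (temp : List Int) (tv : Int) : List Int → Option Int
  | [] => none
  | j :: js => if temp.getD j.toNat 0 = tv then some j else pvFindJ temp tv js

-- one iteration of A's outer loop; all list indices are in range (1 ≤ i < j < len temp), so getD is exact
def pvStepA (target : List Int) (s : List (Int × Int) × List Int) (i : Int) :
    List (Int × Int) × List Int :=
  let swaps := s.1
  let temp := s.2
  if temp.getD i.toNat 0 ≠ target.getD i.toNat 0 then
    match pvFindJ temp (target.getD i.toNat 0) (PySem.List.pyRange (i+1) ((temp.length : Int) - 1) 1) with
    | some j => (swaps ++ [(i, j)],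
        (temp.set i.toNat (temp.getD j.toNat 0)).set j.toNat (temp.getD i.toNat 0))
    | none => (swaps, temp)
  else (swaps, temp)

def get_swap_sequence_py (source : List Int) (target : List Int) : List (Int × Int) :=
  ((PySem.List.pyRange 1 ((source.length : Int) - 1) 1).foldl (pvStepA target) ([], source)).1

-- ===== PORT B =====
-- the hand-written 'while k2 < len(lv) and lv[k2] < j: …; lv.insert(k2, j)' of Source B
def pvInsertPos (j : Int) : List Int → List Int
  | [] => [j]
  | x :: xs => if x < j then x :: pvInsertPos j xs else j :: x :: xs

-- build phase: pos.setdefault(temp[k], []).append(k) for k in range(1, n-1)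
def pvBuildPos (temp : List Int) : PySem.Dict Int (List Int) :=
  (PySem.List.pyRange 1 ((temp.length : Int) - 1) 1).foldl
    (fun d k => d.modify (temp.getD k.toNat 0) [] (fun l => l ++ [k])) PySem.Dict.empty

-- one iteration of B's main loop; pos[v] is never absent/empty when popped (see invariant), getD [] is exact
def pvStepB (target : List Int) (s : List (Int × Int) × List Int × PySem.Dict Int (List Int))
    (i : Int) : List (Int × Int) × List Int × PySem.Dict Int (List Int) :=
  let swaps := s.1
  let temp := s.2.1
  let pos := s.2.2
  let v := temp.getD i.toNat 0
  let pos1 := pos.insert v ((pos.getD v []).tail)        -- pos[v].pop(0)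
  let t := target.getD i.toNat 0
  if v ≠ t then
    match pos1.getD t [] with
    | [] => (swaps, temp, pos1)                          -- pos.get(t) missing or empty
    | j :: rest =>
      let pos2 := pos1.insert t rest                     -- j = lst.pop(0)
      let temp' := (temp.set i.toNat t).set j.toNat v    -- temp[i], temp[j] = t, v
      (swaps ++ [(i, j)], temp', pos2.insert v (pvInsertPos j (pos2.getD v [])))
  else (swaps, temp, pos1)

def get_swap_sequence_py_alt (source : List Int) (target : List Int) : List (Int × Int) :=
  ((PySem.List.pyRange 1 ((source.length : Int) - 1) 1).foldl (pvStepB target)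
    ([], source, pvBuildPos source)).1

-- ===== PRECONDITION & SPEC =====
-- A (and B alike) reads target[i] for every i in 1..len(source)-2 and raises IndexError when target
-- is shorter than len(source)-1; Pre_ excludes exactly those inputs.
def Pre_get_swap_sequence_py (source : List Int) (target : List Int) : Prop :=
  2 < source.length → source.length ≤ target.length + 1
instance (source : List Int) (target : List Int) : Decidable (Pre_get_swap_sequence_py source target) := by unfold Pre_get_swap_sequence_py; infer_instance

def pvWitness_get_swap_sequence_py : List Int × List Int := ([0, 2, 1, 0], [0, 1, 2, 0])

def Spec_get_swap_sequence_py (source : List Int) (target : List Int) (out : List (Int × Int)) : Prop := out = get_swap_sequence_py_alt source target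
instance (source : List Int) (target : List Int) (out : List (Int × Int)) : Decidable (Spec_get_swap_sequence_py source target out) := by unfold Spec_get_swap_sequence_py; infer_instance

-- ===== CLAIM (what is proved, stated in full; the proofs are below) =====
def Claim_equal_get_swap_sequence_py : Prop := ∀ (source : List Int) (target : List Int), Dom_get_swap_sequence_py source target → Pre_get_swap_sequence_py source target → Spec_get_swap_sequence_py source target (get_swap_sequence_py source target)

-- ===== LEMMAS AND PROOFS =====

-- downward induction over an Int interval bounded above by b
lemma pv_ind {b : Int} (P : Int → Prop) (base : ∀ a, b ≤ a → P a)
    (step : ∀ a, a < b → P (a + 1) → P a) : ∀ a, P a := by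
  have key : ∀ (m : Nat) (a : Int), (b - a).toNat ≤ m → P a := by
    intro m
    induction m with
    | zero => intro a h0; exact base a (by omega)
    | succ m ih =>
      intro a hm
      by_cases hab : b ≤ a
      · exact base a hab
      · exact step a (by omega) (ih (a + 1) (by omega))
  intro a; exact key (b - a).toNat a le_rfl

-- the ascending list of positions of value u in temp over the index window [a, b)
def pvW (temp : List Int) (u a b : Int) : List Int :=
  (PySem.List.pyRange a b 1).filter (fun k => temp.getD k.toNat 0 == u)

lemma pvW_nil (temp : List Int) (u : Int) {a b : Int} (h : b ≤ a) : pvW temp u a b = [] := by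
  simp [pvW, PySem.List.pyRange_one_eq_nil h]

lemma pvW_cons_pos (temp : List Int) (u : Int) {a b : Int} (h : a < b)
    (ht : temp.getD a.toNat 0 = u) : pvW temp u a b = a :: pvW temp u (a + 1) b := by
  have ht' : temp[a.toNat]?.getD 0 = u := by simpa [List.getD_eq_getElem?_getD] using ht
  simp [pvW, PySem.List.pyRange_one_cons h, ht']

lemma pvW_cons_neg (temp : List Int) (u : Int) {a b : Int} (h : a < b)
    (ht : ¬ temp.getD a.toNat 0 = u) : pvW temp u a b = pvW temp u (a + 1) b := by
  have ht' : ¬ temp[a.toNat]?.getD 0 = u := by simpa [List.getD_eq_getElem?_getD] using ht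
  simp [pvW, PySem.List.pyRange_one_cons h, ht']

lemma pvW_mem (temp : List Int) {u a b k : Int} (h : k ∈ pvW temp u a b) :
    a ≤ k ∧ k < b ∧ temp.getD k.toNat 0 = u := by
  have := List.of_mem_filter h
  have hm := List.mem_of_mem_filter h
  rw [PySem.List.mem_pyRange_one] at hm
  exact ⟨hm.1, hm.2, by simpa using this⟩

lemma pvW_congr (temp temp2 : List Int) (u u2 : Int) {a b : Int}
    (h : ∀ k, a ≤ k → k < b → (temp.getD k.toNat 0 = u ↔ temp2.getD k.toNat 0 = u2)) :
    pvW temp u a b = pvW temp2 u2 a b := by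
  apply List.filter_congr
  intro k hk
  rw [PySem.List.mem_pyRange_one] at hk
  have hiff := h k hk.1 hk.2
  by_cases hku : temp.getD k.toNat 0 = u
  · have h2 := hiff.mp hku
    simp only [List.getD_eq_getElem?_getD] at hku h2
    simp [hku, h2]
  · have h2 : ¬ temp2.getD k.toNat 0 = u2 := fun h2 => hku (hiff.mpr h2)
    simp only [List.getD_eq_getElem?_getD] at hku h2
    simp [hku, h2]

lemma pvFindJ_eq (temp : List Int) (tv : Int) (l : List Int) :
    pvFindJ temp tv l = (l.filter (fun k => temp.getD k.toNat 0 == tv)).head? := by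
  induction l with
  | nil => rfl
  | cons x xs ih =>
    by_cases hx : temp.getD x.toNat 0 = tv <;>
    · have hx' := hx
      simp only [List.getD_eq_getElem?_getD] at hx'
      simp [pvFindJ, hx', ih]

lemma pvInsertPos_front (j : Int) (l : List Int) (h : ∀ x ∈ l, j < x) :
    pvInsertPos j l = j :: l := by
  cases l with
  | nil => rfl
  | cons x xs =>
    have : ¬ x < j := by have := h x (by simp); omega
    simp [pvInsertPos, this]

-- removing the first occurrence: if temp2 agrees with temp on [a0, b) except at j where it stops matching u,
-- then the window list of temp2 is the tail after j
lemma pvW_remove (temp temp2 : List Int) (u j a0 b : Int)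
    (hj2 : ¬ temp2.getD j.toNat 0 = u)
    (hcong : ∀ k, a0 ≤ k → k < b → k ≠ j → (temp.getD k.toNat 0 = u ↔ temp2.getD k.toNat 0 = u)) :
    ∀ a, a0 ≤ a → ∀ rest, pvW temp u a b = j :: rest → pvW temp2 u a b = rest := by
  refine pv_ind (b := b) _ ?_ ?_
  · intro a hba ha0 rest h
    rw [pvW_nil temp u hba] at h; cases h
  · intro a hab ih ha0 rest h
    by_cases hpa : temp.getD a.toNat 0 = u
    · rw [pvW_cons_pos temp u hab hpa] at h
      have haj : a = j := by injection h
      have hrest : pvW temp u (a + 1) b = rest := by injection h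
      subst haj
      rw [pvW_cons_neg temp2 u hab hj2, ← hrest]
      exact pvW_congr temp2 temp u u (fun k hk1 hk2 =>
        (hcong k (by omega) hk2 (by omega)).symm)
    · have hja : j ≠ a := by
        intro e
        have : j ∈ pvW temp u a b := by rw [h]; simp
        exact hpa (e ▸ (pvW_mem temp this).2.2)
      have hpa2 : ¬ temp2.getD a.toNat 0 = u := by
        intro h2; exact hpa ((hcong a ha0 hab (Ne.symm hja)).mpr h2)
      rw [pvW_cons_neg temp u hab hpa] at h
      rw [pvW_cons_neg temp2 u hab hpa2]
      exact ih (by omega) rest h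

-- inserting a new occurrence: if temp2 newly matches u at j (and agrees elsewhere on [a0, b)),
-- its window list is the ordered insertion of j
lemma pvW_insert (temp temp2 : List Int) (u j a0 b : Int)
    (hj1 : ¬ temp.getD j.toNat 0 = u) (hj2 : temp2.getD j.toNat 0 = u) (hjb : j < b)
    (hcong : ∀ k, a0 ≤ k → k < b → k ≠ j → (temp.getD k.toNat 0 = u ↔ temp2.getD k.toNat 0 = u)) :
    ∀ a, a0 ≤ a → a ≤ j → pvW temp2 u a b = pvInsertPos j (pvW temp u a b) := by
  refine pv_ind (b := b) _ ?_ ?_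
  · intro a hba ha0 haj; omega
  · intro a hab ih ha0 haj
    by_cases haj' : a = j
    · subst haj'
      rw [pvW_cons_pos temp2 u hab hj2, pvW_cons_neg temp u hab hj1]
      rw [pvInsertPos_front a _ (fun x hx => by have := (pvW_mem temp hx).1; omega)]
      congr 1
      exact pvW_congr temp2 temp u u (fun k hk1 hk2 =>
        (hcong k (by omega) hk2 (by omega)).symm)
    · have haltj : a < j := by omega
      by_cases hpa : temp.getD a.toNat 0 = u
      · have hpa2 : temp2.getD a.toNat 0 = u := (hcong a ha0 hab haj').mp hpa
        rw [pvW_cons_pos temp2 u hab hpa2, pvW_cons_pos temp u hab hpa]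
        simp only [pvInsertPos, if_pos haltj]
        congr 1
        exact ih (by omega) (by omega)
      · have hpa2 : ¬ temp2.getD a.toNat 0 = u := fun h2 => hpa ((hcong a ha0 hab haj').mpr h2)
        rw [pvW_cons_neg temp2 u hab hpa2, pvW_cons_neg temp u hab hpa]
        exact ih (by omega) (by omega)

-- getD after the simultaneous swap assignment
lemma pvGetD_swap (temp : List Int) (i j k : Int) (x y : Int)
    (hi0 : 0 ≤ i) (hij : i < j) (hjl : j < (temp.length : Int)) (hk0 : 0 ≤ k) :
    ((temp.set i.toNat x).set j.toNat y).getD k.toNat 0 =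
      if k = j then y else if k = i then x else temp.getD k.toNat 0 := by
  have hjn : j.toNat < temp.length := by omega
  have hin : i.toNat < temp.length := by omega
  by_cases hkj : k = j
  · subst hkj
    simp [List.getD_eq_getElem?_getD, List.length_set, hjn]
  · have h1 : j.toNat ≠ k.toNat := by omega
    by_cases hki : k = i
    · subst hki
      simp [List.getD_eq_getElem?_getD, h1, hin, hkj]
    · have h2 : i.toNat ≠ k.toNat := by omega
      simp [List.getD_eq_getElem?_getD, h1, h2, hkj, hki]

-- the build loop: each key u accumulates exactly its window list
lemma pv_build (temp : List Int) (b : Int) :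
    ∀ a : Int, ∀ (d : PySem.Dict Int (List Int)) (u : Int),
      ((PySem.List.pyRange a b 1).foldl
          (fun d k => d.modify (temp.getD k.toNat 0) [] (fun l => l ++ [k])) d).getD u []
        = d.getD u [] ++ pvW temp u a b := by
  refine pv_ind (b := b) _ ?_ ?_
  · intro a hba d u
    rw [PySem.List.pyRange_one_eq_nil hba, pvW_nil temp u hba]
    simp
  · intro a hab ih d u
    rw [PySem.List.pyRange_one_cons hab]
    simp only [List.foldl_cons]
    rw [ih]
    by_cases hu : u = temp.getD a.toNat 0
    · subst hu
      rw [PySem.Dict.getD_modify_self, pvW_cons_pos temp _ hab rfl]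
      simp
    · rw [PySem.Dict.getD_modify_of_ne _ _ _ hu, pvW_cons_neg temp u hab (fun h => hu h.symm)]

-- the loop invariant: every dictionary entry is the window list of its key
def pvInv (temp : List Int) (pos : PySem.Dict Int (List Int)) (a b : Int) : Prop :=
  ∀ u : Int, pos.getD u [] = pvW temp u a b

-- main lemma: from any common state satisfying the invariant, the two loops produce the same swaps
lemma pv_main (target : List Int) (n : Int) :
    ∀ i : Int, ∀ (swaps : List (Int × Int)) (temp : List Int)
      (pos : PySem.Dict Int (List Int)),
      1 ≤ i → (temp.length : Int) = n → pvInv temp pos i (n - 1) →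
      ((PySem.List.pyRange i (n-1) 1).foldl (pvStepA target) (swaps, temp)).1
        = ((PySem.List.pyRange i (n-1) 1).foldl (pvStepB target) (swaps, temp, pos)).1 := by
  refine pv_ind (b := n - 1) _ ?_ ?_
  · intro i hbi swaps temp pos h1 hlen hinv
    rw [PySem.List.pyRange_one_eq_nil hbi]
    rfl
  · intro i hib ih swaps temp pos h1 hlen hinv
    rw [PySem.List.pyRange_one_cons hib]
    simp only [List.foldl_cons]
    -- pos[v].pop(0): the invariant after shrinking the window to (i, n-1)
    have hWv : pvW temp (temp.getD i.toNat 0) i (n-1) =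
        i :: pvW temp (temp.getD i.toNat 0) (i+1) (n-1) :=
      pvW_cons_pos temp _ hib rfl
    have hinv1 : pvInv temp
        (pos.insert (temp.getD i.toNat 0) ((pos.getD (temp.getD i.toNat 0) []).tail))
        (i+1) (n-1) := by
      intro u
      by_cases hu : u = temp.getD i.toNat 0
      · subst hu
        rw [PySem.Dict.getD_insert_self, hinv _, hWv]
        rfl
      · rw [PySem.Dict.getD_insert_of_ne _ _ _ hu, hinv u,
          pvW_cons_neg temp u hib (fun h => hu h.symm)]
    by_cases hvt : temp.getD i.toNat 0 = target.getD i.toNat 0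
    · -- values already agree: both sides only shrink the window
      have hvt2 : temp[i.toNat]?.getD 0 = target[i.toNat]?.getD 0 := by
        simpa [List.getD_eq_getElem?_getD] using hvt
      have hA : pvStepA target (swaps, temp) i = (swaps, temp) := by
        simp [pvStepA, hvt2]
      have hB : pvStepB target (swaps, temp, pos) i =
          (swaps, temp, pos.insert (temp.getD i.toNat 0) ((pos.getD (temp.getD i.toNat 0) []).tail)) := by
        simp [pvStepB, hvt2]
      rw [hA, hB]
      exact ih swaps temp _ (by omega) hlen hinv1
    · -- mismatch: A scans for target[i], B pops the head of pos[target[i]]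
      have hvt2 : ¬ temp[i.toNat]?.getD 0 = target[i.toNat]?.getD 0 := by
        simpa [List.getD_eq_getElem?_getD] using hvt
      have hfind : pvFindJ temp (target.getD i.toNat 0)
          (PySem.List.pyRange (i+1) ((temp.length : Int) - 1) 1) =
          (pvW temp (target.getD i.toNat 0) (i+1) (n-1)).head? := by
        rw [pvFindJ_eq, hlen]; rfl
      rcases hW : pvW temp (target.getD i.toNat 0) (i+1) (n-1) with _ | ⟨j, rest⟩
      · -- target[i] does not occur after i: both sides leave temp unchanged
        have hA : pvStepA target (swaps, temp) i = (swaps, temp) := by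
          simp only [pvStepA, hfind, hW]
          simp [hvt2]
        have hB : pvStepB target (swaps, temp, pos) i =
            (swaps, temp, pos.insert (temp.getD i.toNat 0) ((pos.getD (temp.getD i.toNat 0) []).tail)) := by
          simp only [pvStepB]
          rw [hinv1 (target.getD i.toNat 0), hW]
          simp [hvt2]
        rw [hA, hB]
        exact ih swaps temp _ (by omega) hlen hinv1
      · -- the swap case
        have hmem : j ∈ pvW temp (target.getD i.toNat 0) (i+1) (n-1) := by rw [hW]; simp
        obtain ⟨hij1, hjb, htj⟩ := pvW_mem temp hmem
        have hjlen : j < (temp.length : Int) := by omega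
        have htj2 : temp[j.toNat]?.getD 0 = target[i.toNat]?.getD 0 := by
          simpa [List.getD_eq_getElem?_getD] using htj
        have hA : pvStepA target (swaps, temp) i = (swaps ++ [(i, j)],
            (temp.set i.toNat (target.getD i.toNat 0)).set j.toNat (temp.getD i.toNat 0)) := by
          simp only [pvStepA, hfind, hW]
          simp [hvt2, htj2]
        have hB : pvStepB target (swaps, temp, pos) i = (swaps ++ [(i, j)],
            (temp.set i.toNat (target.getD i.toNat 0)).set j.toNat (temp.getD i.toNat 0),
            (((pos.insert (temp.getD i.toNat 0) ((pos.getD (temp.getD i.toNat 0) []).tail)).insert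
                (target.getD i.toNat 0) rest).insert (temp.getD i.toNat 0)
              (pvInsertPos j (((pos.insert (temp.getD i.toNat 0) ((pos.getD (temp.getD i.toNat 0) []).tail)).insert
                (target.getD i.toNat 0) rest).getD (temp.getD i.toNat 0) []))) ) := by
          simp only [pvStepB]
          rw [hinv1 (target.getD i.toNat 0), hW]
          simp [hvt2]
        -- the new temp and the swap formula for its entries
        set temp' := (temp.set i.toNat (target.getD i.toNat 0)).set j.toNat (temp.getD i.toNat 0) with htempdef
        have hswap : ∀ k : Int, 0 ≤ k → temp'.getD k.toNat 0 =
            if k = j then temp.getD i.toNat 0 else if k = i then target.getD i.toNat 0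
            else temp.getD k.toNat 0 :=
          fun k hk0 => pvGetD_swap temp i j k _ _ (by omega) (by omega) hjlen hk0
        have hsame : ∀ k, i+1 ≤ k → k < n-1 → k ≠ j → temp'.getD k.toNat 0 = temp.getD k.toNat 0 := by
          intro k hk1 hk2 hk3
          have hki : ¬ k = i := by omega
          rw [hswap k (by omega)]
          simp [hk3, hki]
        have htj' : temp'.getD j.toNat 0 = temp.getD i.toNat 0 := by
          rw [hswap j (by omega)]; simp
        have hcong : ∀ u, ∀ k, i+1 ≤ k → k < n-1 → k ≠ j →
            (temp.getD k.toNat 0 = u ↔ temp'.getD k.toNat 0 = u) := by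
          intro u k hk1 hk2 hk3
          rw [hsame k hk1 hk2 hk3]
        have hlen' : (temp'.length : Int) = n := by
          rw [htempdef]; simp [hlen]
        have hinv3 : pvInv temp'
            ((((pos.insert (temp.getD i.toNat 0) ((pos.getD (temp.getD i.toNat 0) []).tail)).insert
                (target.getD i.toNat 0) rest).insert (temp.getD i.toNat 0)
              (pvInsertPos j (((pos.insert (temp.getD i.toNat 0) ((pos.getD (temp.getD i.toNat 0) []).tail)).insert
                (target.getD i.toNat 0) rest).getD (temp.getD i.toNat 0) []))))
            (i+1) (n-1) := by
          intro u
          by_cases hu : u = temp.getD i.toNat 0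
          · subst hu
            rw [PySem.Dict.getD_insert_self,
              PySem.Dict.getD_insert_of_ne _ _ _ hvt, hinv1 _]
            exact (pvW_insert temp temp' (temp.getD i.toNat 0) j (i+1) (n-1)
              (fun e => hvt (htj ▸ e).symm) htj' hjb
              (hcong _) (i+1) le_rfl (by omega)).symm
          · rw [PySem.Dict.getD_insert_of_ne _ _ _ hu]
            by_cases hu2 : u = target.getD i.toNat 0
            · subst hu2
              rw [PySem.Dict.getD_insert_self]
              exact (pvW_remove temp temp' (target.getD i.toNat 0) j (i+1) (n-1)
                (fun e => hvt (htj' ▸ e)) (hcong _) (i+1) le_rfl rest hW).symm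
            · rw [PySem.Dict.getD_insert_of_ne _ _ _ hu2, hinv1 u]
              apply pvW_congr
              intro k hk1 hk2
              by_cases hk3 : k = j
              · subst hk3
                rw [htj, htj']
                constructor
                · intro e; exact absurd e.symm hu2
                · intro e; exact absurd e.symm hu
              · exact hcong u k hk1 hk2 hk3
        rw [hA, hB]
        exact ih (swaps ++ [(i, j)]) temp' _ (by omega) hlen' hinv3

-- ===== VERDICT (by name: the statement is the Claim_ definition above) =====
theorem get_swap_sequence_py_spec : Claim_equal_get_swap_sequence_py := by
  intro source target hdom hpre
  unfold Spec_get_swap_sequence_py get_swap_sequence_py get_swap_sequence_py_alt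
  apply pv_main target (source.length : Int) 1 [] source (pvBuildPos source) (by omega) rfl
  intro u
  unfold pvBuildPos
  rw [pv_build source ((source.length : Int) - 1) 1 PySem.Dict.empty u,
    PySem.Dict.getD_empty]
  simp
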